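-- pv_equiv track=rewrite | github.com/emregucerr/fun-little-book-thing | functions/tiktok_generator.py | split_scenes_into_equal_parts
-- ===== SOURCE A (Python) =====
-- import math
-- from typing import List, Dict, Any, Tuple, Optional
--
-- def split_scenes_into_equal_parts(scenes: List[Dict[str, str]], max_scenes_per_part: int = 20) -> List[List[Dict[str, str]]]:
--     """Split scenes into equal parts if there are more than max_scenes_per_part scenes."""
--     if len(scenes) <= max_scenes_per_part:
--         return [scenes]
--
--     # Calculate the optimal number of parts
--     num_scenes = len(scenes)
--     num_parts = math.ceil(num_scenes / max_scenes_per_part)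
--
--     # Calculate scenes per part to make them as equal as possible
--     scenes_per_part = num_scenes // num_parts
--     extra_scenes = num_scenes % num_parts
--
--     # Split the scenes
--     parts = []
--     start_idx = 0
--
--     for i in range(num_parts):
--         # Add one extra scene to the first 'extra_scenes' parts
--         current_part_size = scenes_per_part + (1 if i < extra_scenes else 0)
--         end_idx = start_idx + current_part_size
--
--         parts.append(scenes[start_idx:end_idx])
--         start_idx = end_idx
--
--     return parts
-- ===== SOURCE B (Python) =====
-- def split_scenes_into_equal_parts(scenes, max_scenes_per_part=20):
--     """Split scenes into equal parts if there are more than max_scenes_per_part scenes."""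
--     if len(scenes) <= max_scenes_per_part:
--         return [scenes]
--     # Greedy peel: each step takes ceil(len(rest)/parts_left) scenes off the front
--     # of the remaining list, which automatically balances the parts (larger first).
--     parts = []
--     rest = scenes
--     parts_left = -(-len(scenes) // max_scenes_per_part)
--     while parts_left > 0:
--         size = -(-len(rest) // parts_left)
--         parts.append(rest[:size])
--         rest = rest[size:]
--         parts_left -= 1
--     return parts
-- ===== Notes on version B (the rewrite author's own statement) =====
-- stated objective: alternative
-- what changed: Replaces A's precomputed quota (q = n//parts, r = n%parts) and running start-index slicing of the original list by a greedy peel loop over a shrinking remainder: each step takes ceil(len(rest)/parts_left) scenes off the front of the remaining list, never computing q, r, extra_scenes or indices into the original list.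
import Mathlib
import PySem

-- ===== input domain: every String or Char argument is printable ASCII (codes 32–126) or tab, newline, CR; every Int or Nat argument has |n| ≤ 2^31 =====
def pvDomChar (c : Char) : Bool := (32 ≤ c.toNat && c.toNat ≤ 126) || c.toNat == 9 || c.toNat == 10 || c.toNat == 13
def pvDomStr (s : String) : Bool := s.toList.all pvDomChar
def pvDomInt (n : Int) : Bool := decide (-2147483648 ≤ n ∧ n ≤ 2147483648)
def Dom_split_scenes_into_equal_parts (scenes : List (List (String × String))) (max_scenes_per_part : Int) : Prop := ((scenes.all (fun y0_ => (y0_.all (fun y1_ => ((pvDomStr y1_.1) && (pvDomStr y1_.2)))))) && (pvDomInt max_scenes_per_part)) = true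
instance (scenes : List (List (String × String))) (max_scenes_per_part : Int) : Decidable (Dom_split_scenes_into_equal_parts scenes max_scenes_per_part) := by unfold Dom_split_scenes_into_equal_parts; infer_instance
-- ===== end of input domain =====

-- B replaces A's precomputed quota + running start-index loop by a greedy peel loop
-- (each step takes ceil(len(rest)/parts_left) scenes off the remaining list); same O(n) cost.

-- ===== PORT A =====
-- math.ceil(num_scenes / max) is exact ceiling division here (both operands are ints
-- well inside double precision on Dom); ported as -((-n) // m) with Python floor-division.
def split_scenes_into_equal_parts (scenes : List (List (String × String))) (max_scenes_per_part : Int) : List (List (List (String × String))) :=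
  if (scenes.length : Int) ≤ max_scenes_per_part then [scenes]
  else
    let num_scenes : Int := (scenes.length : Int)
    let num_parts : Int := -(PySem.Int.floordiv (-num_scenes) max_scenes_per_part)
    let scenes_per_part : Int := PySem.Int.floordiv num_scenes num_parts
    let extra_scenes : Int := PySem.Int.mod num_scenes num_parts
    ((PySem.List.pyRange 0 num_parts 1).foldl
      (fun (st : List (List (List (String × String))) × Int) i =>
        let current_part_size := scenes_per_part + (if i < extra_scenes then (1 : Int) else 0)
        let end_idx := st.2 + current_part_size
        (st.1 ++ [PySem.List.slice scenes (some st.2) (some end_idx)], end_idx))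
      ([], 0)).1

-- ===== PORT B =====
-- Source B's while loop: greedy peel of the next ceil(len(rest)/parts_left) scenes,
-- state (parts, rest, parts_left)
def pvTakeParts (parts : List (List (List (String × String)))) (rest : List (List (String × String))) (parts_left : Int) : List (List (List (String × String))) :=
  if parts_left ≤ 0 then parts
  else
    let size : Int := -(PySem.Int.floordiv (-(rest.length : Int)) parts_left)
    pvTakeParts (parts ++ [PySem.List.slice rest none (some size)])
      (PySem.List.slice rest (some size) none) (parts_left - 1)
termination_by parts_left.toNat
decreasing_by omega

def split_scenes_into_equal_parts_alt (scenes : List (List (String × String))) (max_scenes_per_part : Int) : List (List (List (String × String))) :=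
  if (scenes.length : Int) ≤ max_scenes_per_part then [scenes]
  else
    let num_parts : Int := -(PySem.Int.floordiv (-(scenes.length : Int)) max_scenes_per_part)
    pvTakeParts [] scenes num_parts

-- ===== PRECONDITION & SPEC =====
-- Pre_ excludes exactly the inputs where Python A raises ZeroDivisionError
-- (max = 0 with a nonempty list, or negative max with fewer than |max| scenes,
-- where num_parts comes out 0).
def Pre_split_scenes_into_equal_parts (scenes : List (List (String × String))) (max_scenes_per_part : Int) : Prop :=
  ¬ (max_scenes_per_part = 0 ∧ scenes ≠ []) ∧
  ¬ (max_scenes_per_part < 0 ∧ (scenes.length : Int) < -max_scenes_per_part)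
instance (scenes : List (List (String × String))) (max_scenes_per_part : Int) : Decidable (Pre_split_scenes_into_equal_parts scenes max_scenes_per_part) := by unfold Pre_split_scenes_into_equal_parts; infer_instance
def pvWitness_split_scenes_into_equal_parts : (List (List (String × String))) × Int :=
  ([[("text", "a")], [("text", "b")], [("text", "c")]], 2)

def Spec_split_scenes_into_equal_parts (scenes : List (List (String × String))) (max_scenes_per_part : Int) (out : List (List (List (String × String)))) : Prop := out = split_scenes_into_equal_parts_alt scenes max_scenes_per_part
instance (scenes : List (List (String × String))) (max_scenes_per_part : Int) (out : List (List (List (String × String)))) : Decidable (Spec_split_scenes_into_equal_parts scenes max_scenes_per_part out) := by unfold Spec_split_scenes_into_equal_parts; infer_instance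

-- ===== CLAIM (what is proved, stated in full; the proofs are below) =====
def Claim_equal_split_scenes_into_equal_parts : Prop := ∀ (scenes : List (List (String × String))) (max_scenes_per_part : Int), Dom_split_scenes_into_equal_parts scenes max_scenes_per_part → Pre_split_scenes_into_equal_parts scenes max_scenes_per_part → Spec_split_scenes_into_equal_parts scenes max_scenes_per_part (split_scenes_into_equal_parts scenes max_scenes_per_part)

-- ===== LEMMAS AND PROOFS =====

-- A's running start index after one more iteration: one step of the closed form.
theorem pv_step (i q r : Int) :
    i * q + min i r + (q + (if i < r then (1 : Int) else 0)) = (i + 1) * q + min (i + 1) r := by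
  rw [add_one_mul]
  by_cases h : i < r <;> simp [h, min_def] <;> omega

-- A's foldl over range a..a+k, started at the closed-form boundary, yields the
-- closed-form slices for that range.
theorem pv_fold (scenes : List (List (String × String))) (q r : Int) :
    ∀ (k : Nat) (a : Int) (acc : List (List (List (String × String)))),
    ((PySem.List.pyRange a (a + k) 1).foldl
      (fun (st : List (List (List (String × String))) × Int) i =>
        (st.1 ++ [PySem.List.slice scenes (some st.2) (some (st.2 + (q + (if i < r then (1 : Int) else 0))))],
         st.2 + (q + (if i < r then (1 : Int) else 0))))
      (acc, a * q + min a r)).1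
    = acc ++ (PySem.List.pyRange a (a + k) 1).map
        (fun i => PySem.List.slice scenes (some (i * q + min i r)) (some ((i + 1) * q + min (i + 1) r))) := by
  intro k
  induction k with
  | zero =>
    intro a acc
    simp
  | succ n ih =>
    intro a acc
    rw [PySem.List.pyRange_one_cons (by push_cast; omega : a < a + ((n : Nat) + 1 : Nat))]
    simp only [List.foldl_cons, List.map_cons]
    have hb : a + ((n : Nat) + 1 : Nat) = (a + 1) + (n : Nat) := by push_cast; omega
    rw [hb]
    rw [pv_step a q r]
    rw [ih (a + 1) (acc ++ [PySem.List.slice scenes (some (a * q + min a r)) (some ((a + 1) * q + min (a + 1) r))])]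
    simp

-- B's greedy peel, started at the closed-form boundary, also yields the closed-form slices.
theorem pv_take (scenes : List (List (String × String))) (p q r : Int)
    (hn : (scenes.length : Int) = p * q + r) (hq : 0 ≤ q) (hr : 0 ≤ r) (hrp : r < p) :
    ∀ (k : Nat) (i : Int) (acc : List (List (List (String × String)))), 0 ≤ i → i + k = p →
    pvTakeParts acc (scenes.drop (i * q + min i r).toNat) (p - i)
      = acc ++ (PySem.List.pyRange i p 1).map
          (fun j => PySem.List.slice scenes (some (j * q + min j r)) (some ((j + 1) * q + min (j + 1) r))) := by
  intro k
  induction k with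
  | zero =>
    intro i acc _ hip
    have hip' : i = p := by omega
    rw [pvTakeParts]
    simp [hip', PySem.List.pyRange_one_eq_nil (le_refl p)]
  | succ m ih =>
    intro i acc hi0 hip
    have hilt : i < p := by omega
    have hd : 0 < p - i := by omega
    set c : Int := i * q + min i r with hc
    have hc0 : 0 ≤ c := by
      have h1 : 0 ≤ i * q := mul_nonneg hi0 hq
      rw [hc]; cases le_total i r with
      | inl h => rw [min_eq_left h]; omega
      | inr h => rw [min_eq_right h]; omega
    set s : Int := q + (if i < r then (1 : Int) else 0) with hs
    have hs0 : 0 ≤ s := by rw [hs]; split_ifs <;> omega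
    have hcs : c + s = (i + 1) * q + min (i + 1) r := pv_step i q r
    have hcn : c + s ≤ (scenes.length : Int) := by
      rw [hcs, hn]
      have h1 : (i + 1) * q ≤ p * q := mul_le_mul_of_nonneg_right (by omega) hq
      have h2 : min (i + 1) r ≤ r := min_le_right _ _
      omega
    have hclen : c ≤ (scenes.length : Int) := by omega
    have hlenrest : ((scenes.drop c.toNat).length : Int) = (scenes.length : Int) - c := by
      simp [List.length_drop]; omega
    -- the greedy size equals q (+1 while extras remain)
    have hsize : -(PySem.Int.floordiv (-(((scenes.drop c.toNat).length : Int))) (p - i)) = s := by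
      rw [hlenrest, (PySem.Int.neg_floordiv_neg_eq_iff_of_pos (b := p - i) hd)]
      constructor
      · rw [hs, hc, hn]
        by_cases h : i < r
        · rw [min_eq_left (by omega : i ≤ r)]
          simp only [h, if_true]
          have e : (q + 1 - 1) * (p - i) = p * q - i * q := by ring
          rw [e]; omega
        · rw [min_eq_right (by omega : r ≤ i)]
          simp only [h, if_false]
          have e : (q + 0 - 1) * (p - i) = p * q - i * q - (p - i) := by ring
          rw [e]; omega
      · rw [hs, hc, hn]
        by_cases h : i < r
        · rw [min_eq_left (by omega : i ≤ r)]
          simp only [h, if_true]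
          have e : (q + 1) * (p - i) = p * q - i * q + (p - i) := by ring
          rw [e]; omega
        · rw [min_eq_right (by omega : r ≤ i)]
          simp only [h, if_false]
          have e : (q + 0) * (p - i) = p * q - i * q := by ring
          rw [e]; omega
    -- unfold one peel step of B
    rw [pvTakeParts]
    rw [if_neg (by omega : ¬ p - i ≤ 0)]
    simp only [hsize]
    simp only [PySem.List.slice_to _ hs0, PySem.List.slice_from _ hs0, List.drop_drop]
    -- head: the peeled part is the closed-form slice
    have hhead : List.take s.toNat (List.drop c.toNat scenes)
        = PySem.List.slice scenes (some c) (some (c + s)) := by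
      rw [PySem.List.slice_toNat scenes hc0 (by omega : 0 ≤ c + s)]
      congr 1
      omega
    -- tail: the remaining list starts at the next boundary
    have htail : List.drop (c.toNat + s.toNat) scenes
        = List.drop (((i + 1) * q + min (i + 1) r).toNat) scenes := by
      congr 1
      omega
    have hsub : p - i - 1 = p - (i + 1) := by omega
    rw [hhead, htail, hsub, ih (i + 1) _ (by omega) (by push_cast at hip ⊢; omega)]
    rw [PySem.List.pyRange_one_cons hilt]
    rw [hc] at hcs
    rw [hc, hcs]
    simp

-- ===== VERDICT (by name: the statement is the Claim_ definition above) =====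
theorem split_scenes_into_equal_parts_spec : Claim_equal_split_scenes_into_equal_parts := by
  intro scenes m _hdom hpre
  unfold Spec_split_scenes_into_equal_parts split_scenes_into_equal_parts split_scenes_into_equal_parts_alt
  by_cases hle : (scenes.length : Int) ≤ m
  · simp [hle]
  · simp only [hle, if_false]
    set n : Int := (scenes.length : Int) with hn
    set p : Int := -(PySem.Int.floordiv (-n) m) with hp
    by_cases hppos : 0 < p
    · set q : Int := PySem.Int.floordiv n p with hq
      set r : Int := PySem.Int.mod n p with hr
      have hn0 : 0 ≤ n := by rw [hn]; positivity
      have hr0 : 0 ≤ r := by rw [hr]; exact PySem.Int.mod_nonneg n hppos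
      have hrlt : r < p := by rw [hr]; exact PySem.Int.mod_lt n hppos
      have hq0 : 0 ≤ q := by
        rw [hq, PySem.Int.floordiv_eq_ediv_of_pos hppos]
        exact Int.ediv_nonneg hn0 (le_of_lt hppos)
      have hnpq : n = p * q + r := by
        have h := PySem.Int.floordiv_mul_add_mod n p
        rw [← hq, ← hr] at h
        have hcp : q * p = p * q := mul_comm q p
        omega
      -- A side: the foldl equals the closed-form slices
      have hmin0 : (0 : Int) * q + min 0 r = 0 := by
        rw [min_eq_left hr0]; ring
      have hfold := pv_fold scenes q r p.toNat 0 []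
      rw [hmin0] at hfold
      have hcast : (0 : Int) + (p.toNat : Int) = p := by omega
      rw [hcast] at hfold
      -- B side: the greedy peel equals the same slices
      have htake := pv_take scenes p q r hnpq hq0 hr0 hrlt p.toNat 0 [] (le_refl 0) (by omega)
      rw [hmin0] at htake
      simp only [Int.toNat_zero, List.drop_zero, sub_zero] at htake
      rw [htake]
      simpa using hfold
    · -- num_parts ≤ 0: A's range is empty and B's peel stops immediately
      have hA : PySem.List.pyRange 0 p 1 = [] := by
        rw [PySem.List.pyRange_of_pos 0 p Int.one_pos]
        simp [show ¬ (0 : Int) < p from hppos]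
      have hB : pvTakeParts [] scenes p = [] := by
        rw [pvTakeParts, if_pos (by omega : p ≤ 0)]
      simp [hA, hB]
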